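-- pv_equiv track=rewrite | github.com/GTseq/gtseq_microhap | gtseq_microhap_catalog_and_call.py | _expand_pair_to_gref
-- ===== SOURCE A (Python) =====
-- from typing import Dict, List, Tuple, Optional
--
-- def _gap_profile_before_ref_bases(aligned_ref: str, ref_len: int) -> List[int]:
--     """For an aligned_ref string, return gaps_before[i] = number of '-' before ref base i (0..ref_len),
--     with i==ref_len representing trailing gaps after the last ref base.
--     """
--     gaps_before = [0] * (ref_len + 1)
--     r_i = 0
--     run = 0
--     for ch in aligned_ref:
--         if ch == "-":
--             run += 1
--         else:
--             if r_i <= ref_len: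
--                 gaps_before[r_i] = run
--             run = 0
--             r_i += 1
--     gaps_before[ref_len] = run
--     return gaps_before
--
-- def _expand_pair_to_gref(aligned_ref: str, aligned_seq: str, gref: str, ref: str) -> str:
--     """Expand a (aligned_ref, aligned_seq) pair to match gref (a gapped version of ref).
--
--     gref is constructed as ref with additional '-' runs inserted before each ref base (and possibly at end).
--     This function inserts extra '-' in aligned_seq where gref contains more gaps than aligned_ref.
--     """
--     ref_len = len(ref)
--     # Precompute max gaps-before profile from gref
--     max_gaps = _gap_profile_before_ref_bases(gref, ref_len)
--
--     # Parse the pairwise alignment into per-ref-base components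
--     # For each ref position i: collect insertion-run characters (where aligned_ref == '-') before the base,
--     # then the base-aligned character (where aligned_ref is a base).
--     ins_runs: List[str] = [""] * (ref_len + 1)  # ins before base i, and trailing at ref_len
--     base_chars: List[str] = ["-"] * ref_len
--
--     r_i = 0
--     buf = []
--     for rch, sch in zip(aligned_ref, aligned_seq):
--         if rch == "-":
--             # insertion relative to ref
--             buf.append(sch)
--         else:
--             if r_i < ref_len:
--                 ins_runs[r_i] = "".join(buf)
--                 buf = []
--                 base_chars[r_i] = sch
--             r_i += 1
--     # trailing insertions
--     ins_runs[ref_len] = "".join(buf)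
--
--     # Now expand to match gref
--     out = []
--     for i in range(ref_len):
--         run = ins_runs[i]
--         if len(run) < max_gaps[i]:
--             run = run + ("-" * (max_gaps[i] - len(run)))
--         out.append(run)
--         out.append(base_chars[i])
--     # trailing
--     run = ins_runs[ref_len]
--     if len(run) < max_gaps[ref_len]:
--         run = run + ("-" * (max_gaps[ref_len] - len(run)))
--     out.append(run)
--     return "".join(out)
-- ===== SOURCE B (Python) =====
-- def _gap_profile_before_ref_bases(aligned_ref, ref_len):
--     # same essential linear scan as A: gaps before each ref base, trailing at ref_len
--     gaps_before = [0] * (ref_len + 1)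
--     r_i = 0
--     run = 0
--     for ch in aligned_ref:
--         if ch == "-":
--             run += 1
--         else:
--             if r_i <= ref_len:
--                 gaps_before[r_i] = run
--             run = 0
--             r_i += 1
--     gaps_before[ref_len] = run
--     return gaps_before
--
-- def _expand_pair_to_gref(aligned_ref, aligned_seq, gref, ref):
--     ref_len = len(ref)
--     max_gaps = _gap_profile_before_ref_bases(gref, ref_len)
--     out = []
--     buf = []
--     r_i = 0
--     for rch, sch in zip(aligned_ref, aligned_seq):
--         if rch == "-":
--             buf.append(sch)
--         else:
--             if r_i < ref_len:
--                 out.extend(buf)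
--                 out.append("-" * (max_gaps[r_i] - len(buf)))
--                 out.append(sch)
--                 buf = []
--             r_i += 1
--     for i in range(r_i, ref_len):
--         out.append("-" * max_gaps[i])
--         out.append("-")
--     out.extend(buf)
--     out.append("-" * (max_gaps[ref_len] - len(buf)))
--     return "".join(out)
-- ===== Notes on version B (the rewrite author's own statement) =====
-- stated objective: simpler
-- what changed: B keeps the gap-profile scan of gref but replaces A's two intermediate per-ref-position arrays (ins_runs, base_chars) and the separate emit loop with one fused pass over zip(aligned_ref, aligned_seq) that pads and emits each insertion run and base directly, plus a short tail loop for unreached ref positions.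
import Mathlib
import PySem

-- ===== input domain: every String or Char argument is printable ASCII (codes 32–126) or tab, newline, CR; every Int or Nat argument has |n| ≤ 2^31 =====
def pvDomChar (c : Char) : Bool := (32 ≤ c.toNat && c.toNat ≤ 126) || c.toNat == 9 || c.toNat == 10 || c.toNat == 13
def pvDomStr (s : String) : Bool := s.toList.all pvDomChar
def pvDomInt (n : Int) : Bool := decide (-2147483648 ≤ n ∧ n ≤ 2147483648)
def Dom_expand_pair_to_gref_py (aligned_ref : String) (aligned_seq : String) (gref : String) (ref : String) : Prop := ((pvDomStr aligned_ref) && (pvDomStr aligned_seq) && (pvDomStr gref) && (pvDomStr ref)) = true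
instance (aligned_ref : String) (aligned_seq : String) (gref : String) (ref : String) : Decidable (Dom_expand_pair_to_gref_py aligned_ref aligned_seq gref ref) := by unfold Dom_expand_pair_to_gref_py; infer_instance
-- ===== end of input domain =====

-- B replaces A's two intermediate arrays and separate emit loop with one fused pass (simpler, same return value).

-- ===== PORT A =====
-- helper _gap_profile_before_ref_bases, transliterated (loop as a foldl over the same state)
def pvGapStepA (ref_len : Nat) (st : List Nat × Nat × Nat) (ch : Char) : List Nat × Nat × Nat :=
  if ch = '-' then (st.1, st.2.1, st.2.2 + 1)
  else ((if st.2.1 ≤ ref_len then st.1.set st.2.1 st.2.2 else st.1), st.2.1 + 1, 0)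

def gap_profile_before_ref_bases_py (aligned_ref : List Char) (ref_len : Nat) : List Nat :=
  let st := aligned_ref.foldl (pvGapStepA ref_len) (List.replicate (ref_len + 1) 0, 0, 0)
  st.1.set ref_len st.2.2

-- the parse loop of A: state (ins_runs, base_chars, r_i, buf)
def pvParseStepA (ref_len : Nat) (st : List (List Char) × List Char × Nat × List Char) (p : Char × Char) :
    List (List Char) × List Char × Nat × List Char :=
  if p.1 = '-' then (st.1, st.2.1, st.2.2.1, st.2.2.2 ++ [p.2])
  else if st.2.2.1 < ref_len then
    (st.1.set st.2.2.1 st.2.2.2, st.2.1.set st.2.2.1 p.2, st.2.2.1 + 1, [])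
  else (st.1, st.2.1, st.2.2.1 + 1, st.2.2.2)

-- A's "pad only if shorter" step: if len(run) < m: run = run + '-'*(m-len(run))
def pvPadIf (run : List Char) (m : Nat) : List Char :=
  if run.length < m then run ++ List.replicate (m - run.length) '-' else run

def expand_pair_to_gref_py (aligned_ref : String) (aligned_seq : String) (gref : String) (ref : String) : String :=
  let ref_len := ref.toList.length
  let max_gaps := gap_profile_before_ref_bases_py gref.toList ref_len
  let st := (aligned_ref.toList.zip aligned_seq.toList).foldl (pvParseStepA ref_len)
      (List.replicate (ref_len + 1) [], List.replicate ref_len '-', 0, [])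
  let ins_runs := st.1.set ref_len st.2.2.2
  let base_chars := st.2.1
  let out := (List.range ref_len).foldl (fun out i =>
      out ++ pvPadIf (ins_runs.getD i []) (max_gaps.getD i 0) ++ [base_chars.getD i '-']) []
  String.ofList (out ++ pvPadIf (ins_runs.getD ref_len []) (max_gaps.getD ref_len 0))

-- ===== PORT B =====
-- B keeps the essential gap-profile scan of gref (written as direct recursion here, as in Source B's loop)
def pvGapScanB (ref_len : Nat) : List Char → List Nat → Nat → Nat → List Nat
  | [], g, _, run => g.set ref_len run
  | ch :: t, g, r_i, run =>
    if ch = '-' then pvGapScanB ref_len t g r_i (run + 1)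
    else pvGapScanB ref_len t (if r_i ≤ ref_len then g.set r_i run else g) (r_i + 1) 0

-- B's single fused pass: state (out, buf, r_i)
def pvEmitStepB (ref_len : Nat) (mg : List Nat) (st : List Char × List Char × Nat) (p : Char × Char) :
    List Char × List Char × Nat :=
  if p.1 = '-' then (st.1, st.2.1 ++ [p.2], st.2.2)
  else if st.2.2 < ref_len then
    (st.1 ++ st.2.1 ++ List.replicate (mg.getD st.2.2 0 - st.2.1.length) '-' ++ [p.2], [], st.2.2 + 1)
  else (st.1, st.2.1, st.2.2 + 1)

def expand_pair_to_gref_py_alt (aligned_ref : String) (aligned_seq : String) (gref : String) (ref : String) : String :=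
  let ref_len := ref.toList.length
  let mg := pvGapScanB ref_len gref.toList (List.replicate (ref_len + 1) 0) 0 0
  let st := (aligned_ref.toList.zip aligned_seq.toList).foldl (pvEmitStepB ref_len mg) ([], [], 0)
  let out := (List.range' st.2.2 (ref_len - st.2.2)).foldl
      (fun out i => out ++ List.replicate (mg.getD i 0) '-' ++ ['-']) st.1
  String.ofList (out ++ st.2.1 ++ List.replicate (mg.getD ref_len 0 - st.2.1.length) '-')

-- ===== PRECONDITION & SPEC =====
def Spec_expand_pair_to_gref_py (aligned_ref : String) (aligned_seq : String) (gref : String) (ref : String) (out : String) : Prop := out = expand_pair_to_gref_py_alt aligned_ref aligned_seq gref ref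
instance (aligned_ref : String) (aligned_seq : String) (gref : String) (ref : String) (out : String) : Decidable (Spec_expand_pair_to_gref_py aligned_ref aligned_seq gref ref out) := by unfold Spec_expand_pair_to_gref_py; infer_instance

-- ===== CLAIM (what is proved, stated in full; the proofs are below) =====
def Claim_equal_expand_pair_to_gref_py : Prop := ∀ (aligned_ref : String) (aligned_seq : String) (gref : String) (ref : String), Dom_expand_pair_to_gref_py aligned_ref aligned_seq gref ref → Spec_expand_pair_to_gref_py aligned_ref aligned_seq gref ref (expand_pair_to_gref_py aligned_ref aligned_seq gref ref)

-- ===== LEMMAS AND PROOFS =====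

-- B's recursive gap scan computes the same profile as A's foldl scan
theorem gapScan_eq (ref_len : Nat) : ∀ (l : List Char) (g : List Nat) (r_i run : Nat),
    pvGapScanB ref_len l g r_i run =
      (let st := l.foldl (pvGapStepA ref_len) (g, r_i, run); st.1.set ref_len st.2.2) := by
  intro l
  induction l with
  | nil => intro g r_i run; rfl
  | cons ch t ih =>
    intro g r_i run
    by_cases h : ch = '-' <;> simp [pvGapScanB, pvGapStepA, h, ih]

theorem padIf_eq (run : List Char) (m : Nat) :
    pvPadIf run m = run ++ List.replicate (m - run.length) '-' := by
  unfold pvPadIf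
  split_ifs with h
  · rfl
  · simp [Nat.sub_eq_zero_of_le (Nat.le_of_not_lt h)]

-- emit of A over a range of ref positions, in flatMap form
def pvEmitFrom (mg : List Nat) (ins : List (List Char)) (base : List Char) (a n : Nat) : List Char :=
  (List.range' a n).flatMap (fun i => pvPadIf (ins.getD i []) (mg.getD i 0) ++ [base.getD i '-'])

-- A's parse fold: slots below the current r_i are never touched again
theorem parseA_mono (ref_len : Nat) : ∀ (t : List (Char × Char))
    (ins : List (List Char)) (base : List Char) (r : Nat) (buf : List Char) (j : Nat), j < r →
    (let st := t.foldl (pvParseStepA ref_len) (ins, base, r, buf)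
     st.1.getD j [] = ins.getD j [] ∧ st.2.1.getD j '-' = base.getD j '-') := by
  intro t
  induction t with
  | nil => intro ins base r buf j hj; exact ⟨rfl, rfl⟩
  | cons p t ih =>
    intro ins base r buf j hj
    simp only [List.foldl_cons]
    by_cases h1 : p.1 = '-'
    · rw [show pvParseStepA ref_len (ins, base, r, buf) p = (ins, base, r, buf ++ [p.2]) by
        simp [pvParseStepA, h1]]
      exact ih ins base r (buf ++ [p.2]) j hj
    · by_cases h2 : r < ref_len
      · rw [show pvParseStepA ref_len (ins, base, r, buf) p
            = (ins.set r buf, base.set r p.2, r + 1, []) by simp [pvParseStepA, h1, h2]]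
        obtain ⟨ha, hb⟩ := ih (ins.set r buf) (base.set r p.2) (r + 1) [] j (Nat.lt_succ_of_lt hj)
        refine ⟨?_, ?_⟩
        · rw [ha]; simp [List.getD_eq_getElem?_getD, List.getElem?_set_ne (Ne.symm (Nat.ne_of_lt hj))]
        · rw [hb]; simp [List.getD_eq_getElem?_getD, List.getElem?_set_ne (Ne.symm (Nat.ne_of_lt hj))]
      · rw [show pvParseStepA ref_len (ins, base, r, buf) p = (ins, base, r + 1, buf) by
            simp [pvParseStepA, h1, h2]]
        exact ih ins base (r + 1) buf j (Nat.lt_succ_of_lt hj)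

-- finishing steps of B (tail emission) and of A (emit loop), as pure functions of the fold states
def pvFinB (ref_len : Nat) (mg : List Nat) (st : List Char × List Char × Nat) : List Char :=
  st.1 ++ (List.range' st.2.2 (ref_len - st.2.2)).flatMap
      (fun i => List.replicate (mg.getD i 0) '-' ++ ['-'])
    ++ st.2.1 ++ List.replicate (mg.getD ref_len 0 - st.2.1.length) '-'

def pvFinA (ref_len : Nat) (mg : List Nat) (r : Nat)
    (st : List (List Char) × List Char × Nat × List Char) : List Char :=
  pvEmitFrom mg (st.1.set ref_len st.2.2.2) st.2.1 (min r ref_len) (ref_len - min r ref_len)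
    ++ pvPadIf ((st.1.set ref_len st.2.2.2).getD ref_len []) (mg.getD ref_len 0)

theorem range'_flatMap_congr {α : Type} (f g : Nat → List α) : ∀ (n a : Nat),
    (∀ i, a ≤ i → i < a + n → f i = g i) →
    (List.range' a n).flatMap f = (List.range' a n).flatMap g := by
  intro n
  induction n with
  | zero => intro a _; rfl
  | succ n ih =>
    intro a h
    rw [List.range'_succ, List.flatMap_cons, List.flatMap_cons,
      h a (Nat.le_refl a) (by omega), ih (a + 1) (fun i h1 h2 => h i (by omega) (by omega))]

-- Main simulation lemma: B's fused pass followed by its tail emission equals A's parse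
-- followed by A's emit over the not-yet-emitted ref positions.
theorem fused_eq (ref_len : Nat) (mg : List Nat) : ∀ (pairs : List (Char × Char))
    (out buf : List Char) (r : Nat) (ins : List (List Char)) (base : List Char),
    ins.length = ref_len + 1 → base.length = ref_len →
    (∀ j, r ≤ j → j < ref_len → ins.getD j [] = [] ∧ base.getD j '-' = '-') →
    pvFinB ref_len mg (pairs.foldl (pvEmitStepB ref_len mg) (out, buf, r))
      = out ++ pvFinA ref_len mg r (pairs.foldl (pvParseStepA ref_len) (ins, base, r, buf)) := by
  intro pairs
  induction pairs with
  | nil =>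
    intro out buf r ins base hlen1 hlen2 hdef
    simp only [List.foldl_nil, pvFinB, pvFinA, pvEmitFrom]
    have htrail : (ins.set ref_len buf).getD ref_len [] = buf := by
      simp [List.getD_eq_getElem?_getD, show ref_len < ins.length from by omega]
    rw [htrail, padIf_eq]
    by_cases hr : r ≤ ref_len
    · rw [Nat.min_eq_left hr]
      rw [range'_flatMap_congr
          (fun i => pvPadIf ((ins.set ref_len buf).getD i []) (mg.getD i 0) ++ [base.getD i '-'])
          (fun i => List.replicate (mg.getD i 0) '-' ++ ['-']) (ref_len - r) r ?_]
      · simp [List.append_assoc]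
      · intro i hi1 hi2
        show pvPadIf ((ins.set ref_len buf).getD i []) (mg.getD i 0) ++ [base.getD i '-']
          = List.replicate (mg.getD i 0) '-' ++ ['-']
        have hi : i < ref_len := by omega
        obtain ⟨hd1, hd2⟩ := hdef i hi1 hi
        have : (ins.set ref_len buf).getD i [] = ins.getD i [] := by
          simp [List.getD_eq_getElem?_getD, List.getElem?_set_ne (by omega : ref_len ≠ i)]
        rw [this, hd1, hd2, padIf_eq]
        simp
    · have h0 : ref_len - r = 0 := by omega
      have h1 : min r ref_len = ref_len := by omega
      simp [h0, h1, List.append_assoc]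
  | cons p t ih =>
    intro out buf r ins base hlen1 hlen2 hdef
    simp only [List.foldl_cons]
    by_cases h1 : p.1 = '-'
    · rw [show pvEmitStepB ref_len mg (out, buf, r) p = (out, buf ++ [p.2], r) by
          simp [pvEmitStepB, h1],
        show pvParseStepA ref_len (ins, base, r, buf) p = (ins, base, r, buf ++ [p.2]) by
          simp [pvParseStepA, h1]]
      exact ih out (buf ++ [p.2]) r ins base hlen1 hlen2 hdef
    · by_cases h2 : r < ref_len
      · rw [show pvEmitStepB ref_len mg (out, buf, r) p
            = (out ++ buf ++ List.replicate (mg.getD r 0 - buf.length) '-' ++ [p.2], [], r + 1) by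
              simp [pvEmitStepB, h1, h2],
          show pvParseStepA ref_len (ins, base, r, buf) p
            = (ins.set r buf, base.set r p.2, r + 1, []) by simp [pvParseStepA, h1, h2]]
        rw [ih (out ++ buf ++ List.replicate (mg.getD r 0 - buf.length) '-' ++ [p.2]) [] (r + 1)
            (ins.set r buf) (base.set r p.2) (by simp [hlen1]) (by simp [hlen2])
            (by
              intro j hj1 hj2
              have hne : r ≠ j := by omega
              obtain ⟨hd1, hd2⟩ := hdef j (by omega) hj2
              have e1 : (ins.set r buf).getD j [] = ins.getD j [] := by
                simp [List.getD_eq_getElem?_getD, List.getElem?_set_ne hne]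
              have e2 : (base.set r p.2).getD j '-' = base.getD j '-' := by
                simp [List.getD_eq_getElem?_getD, List.getElem?_set_ne hne]
              exact ⟨by rw [e1, hd1], by rw [e2, hd2]⟩)]
        obtain ⟨hmono1, hmono2⟩ := parseA_mono ref_len t (ins.set r buf) (base.set r p.2)
          (r + 1) [] r (Nat.lt_succ_self r)
        unfold pvFinA pvEmitFrom
        have hinsr : ((t.foldl (pvParseStepA ref_len) (ins.set r buf, base.set r p.2, r + 1, [])).1.set
            ref_len (t.foldl (pvParseStepA ref_len)
              (ins.set r buf, base.set r p.2, r + 1, [])).2.2.2).getD r [] = buf := by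
          rw [List.getD_eq_getElem?_getD, List.getElem?_set_ne (by omega : ref_len ≠ r),
            ← List.getD_eq_getElem?_getD, hmono1]
          simp [List.getD_eq_getElem?_getD, show r < ins.length from by omega]
        have hbaser : (t.foldl (pvParseStepA ref_len)
            (ins.set r buf, base.set r p.2, r + 1, [])).2.1.getD r '-' = p.2 := by
          rw [hmono2]
          simp [List.getD_eq_getElem?_getD, show r < base.length from by omega]
        rw [Nat.min_eq_left (by omega : r + 1 ≤ ref_len), Nat.min_eq_left (by omega : r ≤ ref_len),
          show ref_len - r = (ref_len - (r + 1)) + 1 from by omega, List.range'_succ,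
          List.flatMap_cons, hinsr, hbaser]
        simp [padIf_eq, List.append_assoc]
      · rw [show pvEmitStepB ref_len mg (out, buf, r) p = (out, buf, r + 1) by
            simp [pvEmitStepB, h1, h2],
          show pvParseStepA ref_len (ins, base, r, buf) p = (ins, base, r + 1, buf) by
            simp [pvParseStepA, h1, h2]]
        rw [ih out buf (r + 1) ins base hlen1 hlen2 (fun j hj1 hj2 => absurd hj2 (by omega))]
        unfold pvFinA
        rw [show min (r + 1) ref_len = min r ref_len from by omega]

-- assembling: both ports, seen as list computations with the same gap profile mg, agree
theorem final_eq (ref_len : Nat) (mg : List Nat) (pairs : List (Char × Char)) :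
    ((List.range ref_len).foldl (fun out i =>
        out ++ pvPadIf (((pairs.foldl (pvParseStepA ref_len)
              (List.replicate (ref_len + 1) [], List.replicate ref_len '-', 0, [])).1.set ref_len
            (pairs.foldl (pvParseStepA ref_len)
              (List.replicate (ref_len + 1) [], List.replicate ref_len '-', 0, [])).2.2.2).getD i [])
          (mg.getD i 0)
        ++ [(pairs.foldl (pvParseStepA ref_len)
              (List.replicate (ref_len + 1) [], List.replicate ref_len '-', 0, [])).2.1.getD i '-']) []
      ++ pvPadIf (((pairs.foldl (pvParseStepA ref_len)
              (List.replicate (ref_len + 1) [], List.replicate ref_len '-', 0, [])).1.set ref_len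
            (pairs.foldl (pvParseStepA ref_len)
              (List.replicate (ref_len + 1) [], List.replicate ref_len '-', 0, [])).2.2.2).getD ref_len [])
          (mg.getD ref_len 0))
    = ((List.range' (pairs.foldl (pvEmitStepB ref_len mg) ([], [], 0)).2.2
          (ref_len - (pairs.foldl (pvEmitStepB ref_len mg) ([], [], 0)).2.2)).foldl
        (fun out i => out ++ List.replicate (mg.getD i 0) '-' ++ ['-'])
        (pairs.foldl (pvEmitStepB ref_len mg) ([], [], 0)).1
      ++ (pairs.foldl (pvEmitStepB ref_len mg) ([], [], 0)).2.1
      ++ List.replicate (mg.getD ref_len 0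
          - (pairs.foldl (pvEmitStepB ref_len mg) ([], [], 0)).2.1.length) '-') := by
  have key := fused_eq ref_len mg pairs [] [] 0
      (List.replicate (ref_len + 1) []) (List.replicate ref_len '-')
      (by simp) (by simp)
      (by
        intro j hj1 hj2
        refine ⟨?_, ?_⟩ <;>
          simp [List.getD_eq_getElem?_getD, hj2, Nat.lt_succ_of_lt hj2])
  simp only [pvFinB, pvFinA, pvEmitFrom, Nat.zero_min, Nat.sub_zero, List.nil_append,
    List.append_assoc] at key
  rw [List.range_eq_range']
  simp only [List.append_assoc]
  rw [PySem.List.foldl_append_eq_flatMap, PySem.List.foldl_append_eq_flatMap]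
  simp only [List.nil_append, List.append_assoc]
  exact key.symm

-- the two ports agree on every input
theorem ports_eq (aligned_ref aligned_seq gref ref : String) :
    expand_pair_to_gref_py aligned_ref aligned_seq gref ref
      = expand_pair_to_gref_py_alt aligned_ref aligned_seq gref ref := by
  unfold expand_pair_to_gref_py expand_pair_to_gref_py_alt
  simp only [gap_profile_before_ref_bases_py, gapScan_eq]
  exact congrArg String.ofList (final_eq ref.toList.length _ _)

-- ===== VERDICT (by name: the statement is the Claim_ definition above) =====
theorem expand_pair_to_gref_py_spec : Claim_equal_expand_pair_to_gref_py := by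
  unfold Claim_equal_expand_pair_to_gref_py
  intro aligned_ref aligned_seq gref ref _
  exact ports_eq aligned_ref aligned_seq gref ref
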